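-- pv_equiv track=rewrite | github.com/KYUSEONGHAN/Development | 하루에 한개씩 문제 풀기/Python/BOJ/그리디/13305.py | solve
-- ===== SOURCE A (Python) =====
-- def solve(lengths: list, prices: list) -> int:
--     gas_station = list(zip(lengths, prices[:-1]))   # 주유소 정보인 도로 길이, 리터당 가격을 zip 함수로 연결, 마지막 인덱스는 불필요 제외.
--     cost = gas_station[0][1]                        # 첫뻔째 위치에서의 주유소 가격을 기준점으로 잡을 cost 변수 할당
--     result = gas_station[0][0] * gas_station[0][1]  # 최소 비용 값을 담을 변수, 처음 도로 길이 * 가격 정보를 할당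
--
--     for data in gas_station[1:]:   # result함수에 주유소의 첫번째 정보값은 이미 할당했으므로 1부터 슬라이싱 조회
--         if cost > data[1]:
--             cost = data[1]
--         result += cost * data[0]
--
--     return result   # 최소 비용 반환
-- ===== SOURCE B (Python) =====
-- def solve(lengths: list, prices: list) -> int:
--     # Segment-charging recursion: the current station fuels every road up to the
--     # next strictly cheaper station; charge that whole segment at once, recurse.
--     pairs = list(zip(lengths, prices[:-1]))
--
--     def go(pairs):
--         if not pairs:
--             return 0
--         price = pairs[0][1]
--         j = 1
--         while j < len(pairs) and pairs[j][1] >= price: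
--             j += 1
--         return price * sum(l for l, _ in pairs[:j]) + go(pairs[j:])
--
--     return go(pairs)
-- ===== Notes on version B (the rewrite author's own statement) =====
-- stated objective: alternative
-- what changed: B replaces A's fused running-minimum loop by a segment-charging recursion: each prefix-minimum station scans ahead to the next strictly cheaper station, charges that whole block of roads at its price in one multiplication, and recurses on the remainder.
import Mathlib
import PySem

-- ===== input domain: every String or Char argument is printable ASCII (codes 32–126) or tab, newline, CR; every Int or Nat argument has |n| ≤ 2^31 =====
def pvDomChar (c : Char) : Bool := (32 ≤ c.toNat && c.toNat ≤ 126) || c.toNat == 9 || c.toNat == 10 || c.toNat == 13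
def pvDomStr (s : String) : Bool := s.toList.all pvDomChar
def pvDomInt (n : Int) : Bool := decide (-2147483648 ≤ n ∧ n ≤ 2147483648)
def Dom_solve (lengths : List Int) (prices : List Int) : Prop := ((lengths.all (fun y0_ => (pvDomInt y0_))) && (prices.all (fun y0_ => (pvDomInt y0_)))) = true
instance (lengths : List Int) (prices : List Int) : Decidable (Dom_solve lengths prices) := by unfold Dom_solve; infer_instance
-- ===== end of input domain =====

-- B replaces A's fused running-minimum accumulation by a segment-charging recursion: each prefix-minimum station charges the whole block of roads up to the next strictly cheaper station, then recurses (alternative decomposition, same cost); where A raises IndexError (empty zip) B returns 0.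


-- ===== PORT A =====
def solve (lengths : List Int) (prices : List Int) : Int :=
  let gas_station := List.zip lengths (PySem.List.slice prices none (some (-1)))
  match gas_station with
  | [] => 0   -- gas_station[0] raises IndexError in Python; outside Pre_solve
  | g0 :: rest =>
    -- cost := g0.2 ; result := g0.1 * g0.2 ; for data in gas_station[1:] …
    (rest.foldl (fun (s : Int × Int) data =>
        let cost := if s.1 > data.2 then data.2 else s.1
        (cost, s.2 + cost * data.1)) (g0.2, g0.1 * g0.2)).2

-- ===== PORT B =====
-- go(pairs): the head station's price holds until the next strictly cheaper one;
-- the while-scan for that station is the takeWhile/dropWhile split of the tail.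
def goB : List (Int × Int) → Int
  | [] => 0
  | (l, price) :: rest =>
      let pre := rest.takeWhile (fun d => decide (d.2 ≥ price))   -- pairs[1:j]
      let suf := rest.dropWhile (fun d => decide (d.2 ≥ price))   -- pairs[j:]
      price * (l + (pre.map Prod.fst).sum) + goB suf
termination_by pairs => pairs.length
decreasing_by
  simp only [List.length_cons]
  exact Nat.lt_succ_of_le (List.length_dropWhile_le _ _)

def solve_alt (lengths : List Int) (prices : List Int) : Int :=
  goB (List.zip lengths (PySem.List.slice prices none (some (-1))))

-- ===== PRECONDITION & SPEC =====
-- Pre_ excludes exactly the inputs where A raises IndexError: zip(lengths, prices[:-1]) empty.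
def Pre_solve (lengths : List Int) (prices : List Int) : Prop :=
  lengths ≠ [] ∧ 2 ≤ prices.length
instance (lengths : List Int) (prices : List Int) : Decidable (Pre_solve lengths prices) := by unfold Pre_solve; infer_instance
def pvWitness_solve : List Int × List Int := ([3, 2], [5, 1, 4])

def Spec_solve (lengths : List Int) (prices : List Int) (out : Int) : Prop := out = solve_alt lengths prices
instance (lengths : List Int) (prices : List Int) (out : Int) : Decidable (Spec_solve lengths prices out) := by unfold Spec_solve; infer_instance

-- ===== CLAIM (what is proved, stated in full; the proofs are below) =====
def Claim_equal_solve : Prop := ∀ (lengths : List Int) (prices : List Int), Dom_solve lengths prices → Pre_solve lengths prices → Spec_solve lengths prices (solve lengths prices)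

-- ===== LEMMAS AND PROOFS =====

/-- Reference: A's loop body with current minimum `c`, summed over the remaining pairs. -/
def refc : Int → List (Int × Int) → Int
  | _, [] => 0
  | c, (l, q) :: rest =>
      (if c > q then q else c) * l + refc (if c > q then q else c) rest

/-- A's fused fold equals `r` plus `refc`. -/
theorem afold_eq_refc (xs : List (Int × Int)) (c r : Int) :
    (xs.foldl (fun (s : Int × Int) data =>
        let cost := if s.1 > data.2 then data.2 else s.1
        (cost, s.2 + cost * data.1)) (c, r)).2 = r + refc c xs := by
  induction xs generalizing c r with
  | nil => simp [refc]
  | cons x xs ih => cases x with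
    | mk l q => simp only [List.foldl, refc]; rw [ih]; ring

/-- Over a block whose prices are all ≥ c the minimum stays c and the cost is linear. -/
theorem refc_append_ge (pre tail : List (Int × Int)) (c : Int)
    (h : ∀ x ∈ pre, c ≤ x.2) :
    refc c (pre ++ tail) = c * (pre.map Prod.fst).sum + refc c tail := by
  induction pre with
  | nil => simp
  | cons x xs ih =>
    cases x with
    | mk l q =>
      have hq : c ≤ q := h (l, q) List.mem_cons_self
      have : ¬ c > q := by omega
      simp only [List.cons_append, refc, if_neg this, List.map_cons, List.sum_cons]
      rw [ih (fun y hy => h y (List.mem_cons_of_mem _ hy))]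
      ring

/-- B's segment recursion equals A's running-minimum reference (seeded at the head price). -/
theorem goB_nil : goB [] = 0 := by rw [goB]

/-- B's segment recursion equals A's running-minimum reference (seeded at the head price). -/
theorem goB_eq_refc : ∀ (pairs : List (Int × Int)),
    goB pairs = match pairs with
                | [] => 0
                | (l, p) :: rest => p * l + refc p rest := by
  intro pairs
  induction pairs using goB.induct with
  | case1 => exact goB_nil
  | case2 l price rest x ih =>
    have hx : x = rest.dropWhile (fun d => decide (d.2 ≥ price)) := rfl
    rw [hx] at ih
    simp only [goB]
    conv_rhs => rw [← List.takeWhile_append_dropWhile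
      (p := fun d => decide (d.2 ≥ price)) (l := rest)]
    rw [refc_append_ge _ _ _ (fun y hy => by
      have h := List.mem_takeWhile_imp (p := fun d : Int × Int => decide (d.2 ≥ price)) hy
      exact of_decide_eq_true h)]
    rw [ih]
    cases hsuf : rest.dropWhile (fun d => decide (d.2 ≥ price)) with
    | nil => simp [refc]; ring
    | cons y ys =>
      cases y with
      | mk l' q =>
        have hlt : ¬ ((l', q).2 ≥ price) := by
          have := List.head?_dropWhile_not (fun d => decide (d.2 ≥ price)) rest
          rw [hsuf] at this
          simpa using this
        have hgt : price > q := by simp at hlt; omega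
        simp only [refc, if_pos hgt]
        ring

theorem solve_eq (lengths : List Int) (prices : List Int)
    (h1 : lengths ≠ []) (h2 : 2 ≤ prices.length) :
    solve lengths prices = solve_alt lengths prices := by
  obtain ⟨l0, ls, rfl⟩ := List.exists_cons_of_ne_nil h1
  match prices, h2 with
  | p0 :: p1 :: ps, _ =>
    have hslice : PySem.List.slice (p0 :: p1 :: ps) none (some (-1))
        = p0 :: (p1 :: ps).dropLast := by
      rw [PySem.List.slice_to_neg_one]; rfl
    simp only [solve, solve_alt, hslice, List.zip_cons_cons, afold_eq_refc, goB_eq_refc]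
    ring

-- ===== VERDICT (by name: the statement is the Claim_ definition above) =====
theorem solve_spec : Claim_equal_solve := by
  intro lengths prices _ hpre
  exact solve_eq lengths prices hpre.1 hpre.2
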